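-- pv_equiv track=rewrite | github.com/Beastofdev/NutriPlanner | backend/app/services/recipe_selector.py | _extract_primary_proteins
-- ===== SOURCE A (Python) =====
-- from typing import Any, Dict, List, Optional, Set, Tuple
--
-- _PROTEIN_GROUPS = {
--     # Pollo
--     "carne_pechuga_pollo": "pollo", "carne_pollo": "pollo",
--     "conserva_pollo": "pollo", "caldo_pollo": None,  # caldo is not a protein source
--     # Vacuno
--     "carne_picada_vacuno": "vacuno", "carne_ternera": "vacuno",
--     "carne_filetes_vacuno": "vacuno",
--     # Cerdo
--     "carne_cerdo": "cerdo", "carne_lomo_cerdo": "cerdo",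
--     "carne_picada_vacuno_cerdo": "vacuno",  # mixed meat → primary group
--     # Pavo
--     "carne_pavo": "pavo", "carne_filetes_pechuga_pavo": "pavo",
--     "carne_filete_pavo": "pavo", "embutido_lomo_pavo": "pavo",
--     # Embutidos (cerdo-based)
--     "embutido_bacon": "cerdo", "embutido_jamon": "cerdo",
--     # Pescados (unified group to prevent fish concentration)
--     "pescado_salmon": "pescado",
--     "pescado_merluza": "pescado", "pescado_congelado_medallones_merluza": "pescado",
--     "pescado_bacalao": "pescado",
--     "pescado_atun": "pescado", "conserva_atun": "pescado",
--     "pescado_dorada": "pescado", "pescado_congelado_dorada": "pescado",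
--     "pescado_emperador": "pescado",
--     "pescado_calamar": "pescado", "marisco_calamar": "pescado",
--     "pescado_trucha": "pescado", "pescado_sardina": "pescado",
--     "pescado_caballa": "pescado", "pescado_boquerones": "pescado",
--     "pescado_rape": "pescado", "pescado_pez_espada": "pescado",
--     "pescado_lubina": "pescado",
--     # Mariscos (same group as fish)
--     "marisco_gambas": "pescado", "marisco_gamba": "pescado",
--     "marisco_langostino": "pescado",
--     "marisco_mejillon": "pescado",
--     # Huevos
--     "huevos": "huevos",
--     # Tofu
--     "verdura_procesada_tofu": "tofu",
-- }
--
-- _PROTEIN_PREFIXES_SORTED = sorted(_PROTEIN_GROUPS.keys(), key=len, reverse=True)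
--
-- def _extract_primary_proteins(ing_set: Set[str]) -> Set[str]:
--     """Extract protein group names from a set of ingredient canonical names."""
--     proteins = set()
--     for ing in ing_set:
--         for prefix in _PROTEIN_PREFIXES_SORTED:
--             if ing.startswith(prefix):
--                 group = _PROTEIN_GROUPS[prefix]
--                 if group is not None:  # skip non-protein entries like caldo_pollo
--                     proteins.add(group)
--                 break
--     return proteins
-- ===== SOURCE B (Python) =====
-- # B: inverted table (group -> its prefixes) scanned with a running-max over prefix
-- # length per ingredient, instead of first-hit on a length-sorted prefix list.
-- # Correct because distinct prefixes of the same string have distinct lengths, so the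
-- # longest matching prefix is unique and the running max finds exactly it.
--
-- _PROTEIN_TABLE = [
--     ("pollo", ["carne_pechuga_pollo", "carne_pollo", "conserva_pollo"]),
--     (None, ["caldo_pollo"]),  # caldo is not a protein source
--     ("vacuno", ["carne_picada_vacuno", "carne_ternera", "carne_filetes_vacuno",
--                 "carne_picada_vacuno_cerdo"]),
--     ("cerdo", ["carne_cerdo", "carne_lomo_cerdo", "embutido_bacon", "embutido_jamon"]),
--     ("pavo", ["carne_pavo", "carne_filetes_pechuga_pavo", "carne_filete_pavo",
--               "embutido_lomo_pavo"]),
--     ("pescado", ["pescado_salmon", "pescado_merluza",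
--                  "pescado_congelado_medallones_merluza", "pescado_bacalao",
--                  "pescado_atun", "conserva_atun", "pescado_dorada",
--                  "pescado_congelado_dorada", "pescado_emperador", "pescado_calamar",
--                  "marisco_calamar", "pescado_trucha", "pescado_sardina",
--                  "pescado_caballa", "pescado_boquerones", "pescado_rape",
--                  "pescado_pez_espada", "pescado_lubina", "marisco_gambas",
--                  "marisco_gamba", "marisco_langostino", "marisco_mejillon"]),
--     ("huevos", ["huevos"]),
--     ("tofu", ["verdura_procesada_tofu"]),
-- ]
--
-- def _extract_primary_proteins(ing_set):
--     """Extract protein group names from a set of ingredient canonical names."""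
--     proteins = set()
--     for ing in ing_set:
--         best_len, best_group = -1, None
--         for group, prefixes in _PROTEIN_TABLE:
--             for p in prefixes:
--                 if len(p) > best_len and ing.startswith(p):
--                     best_len, best_group = len(p), group
--         if best_group is not None:
--             proteins.add(best_group)
--     return proteins
-- ===== Notes on version B (the rewrite author's own statement) =====
-- stated objective: alternative
-- what changed: B replaces A's first-hit scan of a length-sorted prefix list by an inverted constant table (group -> its prefixes) and, per ingredient, a running-max over prefix lengths across the unsorted table; the longest matching prefix is unique, so the running max picks exactly A's first sorted hit.
import Mathlib
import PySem

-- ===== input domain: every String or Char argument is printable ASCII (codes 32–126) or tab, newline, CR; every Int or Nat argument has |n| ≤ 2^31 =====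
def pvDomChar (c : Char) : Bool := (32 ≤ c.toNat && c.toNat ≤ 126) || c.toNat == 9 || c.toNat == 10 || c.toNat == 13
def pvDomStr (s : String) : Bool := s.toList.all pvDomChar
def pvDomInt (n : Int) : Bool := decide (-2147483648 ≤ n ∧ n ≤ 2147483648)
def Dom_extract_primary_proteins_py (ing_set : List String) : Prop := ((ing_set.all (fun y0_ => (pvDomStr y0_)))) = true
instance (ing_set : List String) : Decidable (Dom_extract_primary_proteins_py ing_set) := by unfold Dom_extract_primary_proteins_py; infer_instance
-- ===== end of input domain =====

-- B inverts the table (group → its prefixes) and, per ingredient, tracks the longest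
-- matching prefix with a running max over the unsorted inverted table, instead of
-- taking the first hit on a length-sorted prefix list (objective: alternative).

-- ===== PORT A =====
-- _PROTEIN_GROUPS (module constant; values Optional[str])
def pvProteinGroups : PySem.Dict String (Option String) := PySem.Dict.mk [  -- literal dict (distinct keys)
    ("carne_pechuga_pollo", some "pollo"),
    ("carne_pollo", some "pollo"),
    ("conserva_pollo", some "pollo"),
    ("caldo_pollo", none),
    ("carne_picada_vacuno", some "vacuno"),
    ("carne_ternera", some "vacuno"),
    ("carne_filetes_vacuno", some "vacuno"),
    ("carne_cerdo", some "cerdo"),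
    ("carne_lomo_cerdo", some "cerdo"),
    ("carne_picada_vacuno_cerdo", some "vacuno"),
    ("carne_pavo", some "pavo"),
    ("carne_filetes_pechuga_pavo", some "pavo"),
    ("carne_filete_pavo", some "pavo"),
    ("embutido_lomo_pavo", some "pavo"),
    ("embutido_bacon", some "cerdo"),
    ("embutido_jamon", some "cerdo"),
    ("pescado_salmon", some "pescado"),
    ("pescado_merluza", some "pescado"),
    ("pescado_congelado_medallones_merluza", some "pescado"),
    ("pescado_bacalao", some "pescado"),
    ("pescado_atun", some "pescado"),
    ("conserva_atun", some "pescado"),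
    ("pescado_dorada", some "pescado"),
    ("pescado_congelado_dorada", some "pescado"),
    ("pescado_emperador", some "pescado"),
    ("pescado_calamar", some "pescado"),
    ("marisco_calamar", some "pescado"),
    ("pescado_trucha", some "pescado"),
    ("pescado_sardina", some "pescado"),
    ("pescado_caballa", some "pescado"),
    ("pescado_boquerones", some "pescado"),
    ("pescado_rape", some "pescado"),
    ("pescado_pez_espada", some "pescado"),
    ("pescado_lubina", some "pescado"),
    ("marisco_gambas", some "pescado"),
    ("marisco_gamba", some "pescado"),
    ("marisco_langostino", some "pescado"),
    ("marisco_mejillon", some "pescado"),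
    ("huevos", some "huevos"),
    ("verdura_procesada_tofu", some "tofu")]

-- _PROTEIN_PREFIXES_SORTED = sorted(_PROTEIN_GROUPS.keys(), key=len, reverse=True)
def pvProteinPrefixesSorted : List String :=
  PySem.List.sorted pvProteinGroups.keys (fun k => PySem.Str.len k) true

-- A's inner 'for prefix in …: if ing.startswith(prefix): … break' loop; returns the group
-- to add (none meaning: no prefix matched, or the matched prefix's group is None, so no add).
-- '_PROTEIN_GROUPS[prefix]' cannot raise KeyError (prefix comes from the key list), so the
-- none branch of get? (unreachable) adds nothing.
def pvScanA (ing : String) : List String → Option String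
  | [] => none
  | p :: rest =>
    if PySem.Str.startswith ing p then
      match pvProteinGroups.get? p with
      | some g => g
      | none => none
    else pvScanA ing rest

def extract_primary_proteins_py (ing_set : List String) : List String :=
  ing_set.foldl (fun proteins ing =>
    match pvScanA ing pvProteinPrefixesSorted with
    | some g => PySem.Set.add proteins g
    | none => proteins) PySem.Set.empty

-- ===== PORT B =====
-- _PROTEIN_TABLE: inverted constant, group (None for non-protein prefixes) → its prefixes
def pvProteinTable : List (Option String × List String) := [
    (some "pollo", ["carne_pechuga_pollo", "carne_pollo", "conserva_pollo"]),
    (none, ["caldo_pollo"]),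
    (some "vacuno", ["carne_picada_vacuno", "carne_ternera", "carne_filetes_vacuno",
                     "carne_picada_vacuno_cerdo"]),
    (some "cerdo", ["carne_cerdo", "carne_lomo_cerdo", "embutido_bacon", "embutido_jamon"]),
    (some "pavo", ["carne_pavo", "carne_filetes_pechuga_pavo", "carne_filete_pavo",
                   "embutido_lomo_pavo"]),
    (some "pescado", ["pescado_salmon", "pescado_merluza",
                      "pescado_congelado_medallones_merluza", "pescado_bacalao",
                      "pescado_atun", "conserva_atun", "pescado_dorada",
                      "pescado_congelado_dorada", "pescado_emperador", "pescado_calamar",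
                      "marisco_calamar", "pescado_trucha", "pescado_sardina",
                      "pescado_caballa", "pescado_boquerones", "pescado_rape",
                      "pescado_pez_espada", "pescado_lubina", "marisco_gambas",
                      "marisco_gamba", "marisco_langostino", "marisco_mejillon"]),
    (some "huevos", ["huevos"]),
    (some "tofu", ["verdura_procesada_tofu"])]

-- B's nested 'for group, prefixes in _PROTEIN_TABLE: for p in prefixes: …' running-max loops,
-- state = (best_len, best_group), initial (-1, None)
def extract_primary_proteins_py_alt (ing_set : List String) : List String :=
  ing_set.foldl (fun proteins ing =>
    let best := pvProteinTable.foldl (fun st gp =>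
      gp.2.foldl (fun st p =>
        if PySem.Str.len p > st.1 ∧ PySem.Str.startswith ing p = true
        then (PySem.Str.len p, gp.1) else st) st)
      ((-1 : Int), (none : Option String))
    match best.2 with
    | some g => PySem.Set.add proteins g
    | none => proteins) PySem.Set.empty

-- ===== PRECONDITION & SPEC =====
def Spec_extract_primary_proteins_py (ing_set : List String) (out : List String) : Prop := out = extract_primary_proteins_py_alt ing_set
instance (ing_set : List String) (out : List String) : Decidable (Spec_extract_primary_proteins_py ing_set out) := by unfold Spec_extract_primary_proteins_py; infer_instance

-- ===== CLAIM (what is proved, stated in full; the proofs are below) =====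
def Claim_equal_extract_primary_proteins_py : Prop := ∀ (ing_set : List String), Dom_extract_primary_proteins_py ing_set → Spec_extract_primary_proteins_py ing_set (extract_primary_proteins_py ing_set)

-- ===== LEMMAS AND PROOFS =====

-- ---- A-side characterisation (the key A's inner loop stops at) ----
def pvFindA (ing : String) : List String → Option String
  | [] => none
  | p :: rest => if PySem.Str.startswith ing p then some p else pvFindA ing rest

theorem pvScanA_eq_find (ing : String) (L : List String) :
    pvScanA ing L = (pvFindA ing L).bind (fun k => (pvProteinGroups.get? k).join) := by
  induction L with
  | nil => rfl
  | cons p rest ih =>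
    by_cases h : PySem.Str.startswith ing p = true
    · simp only [pvScanA, pvFindA]
      rw [if_pos h, if_pos h, Option.bind_some]
      cases pvProteinGroups.get? p <;> rfl
    · simp only [pvScanA, pvFindA]
      rw [if_neg h, if_neg h]
      exact ih

theorem pvFindA_some (ing : String) (L : List String) (k : String)
    (h : pvFindA ing L = some k) : k ∈ L ∧ PySem.Str.startswith ing k = true := by
  induction L with
  | nil => simp [pvFindA] at h
  | cons p rest ih =>
    by_cases hs : PySem.Str.startswith ing p = true
    · simp only [pvFindA] at h
      rw [if_pos hs] at h
      obtain rfl := Option.some.injEq .. |>.mp h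
      exact ⟨List.mem_cons_self, hs⟩
    · simp only [pvFindA] at h
      rw [if_neg hs] at h
      obtain ⟨hm, hw⟩ := ih h
      exact ⟨List.mem_cons_of_mem _ hm, hw⟩

theorem pvFindA_max (ing : String) (L : List String) (k : String)
    (hp : L.Pairwise (fun a b => PySem.Str.len b ≤ PySem.Str.len a))
    (h : pvFindA ing L = some k) :
    ∀ q ∈ L, PySem.Str.startswith ing q = true → PySem.Str.len q ≤ PySem.Str.len k := by
  induction L with
  | nil => simp [pvFindA] at h
  | cons p rest ih =>
    by_cases hs : PySem.Str.startswith ing p = true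
    · simp only [pvFindA] at h
      rw [if_pos hs] at h
      obtain rfl := Option.some.injEq .. |>.mp h
      intro q hq _
      rcases List.mem_cons.mp hq with rfl | hq
      · exact le_refl _
      · exact (List.pairwise_cons.mp hp).1 q hq
    · simp only [pvFindA] at h
      rw [if_neg hs] at h
      intro q hq hw
      rcases List.mem_cons.mp hq with rfl | hq
      · exact absurd hw hs
      · exact ih (List.pairwise_cons.mp hp).2 h q hq hw

theorem pvFindA_none (ing : String) (L : List String)
    (h : pvFindA ing L = none) : ∀ q ∈ L, PySem.Str.startswith ing q = false := by
  induction L with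
  | nil => simp
  | cons p rest ih =>
    by_cases hs : PySem.Str.startswith ing p = true
    · simp only [pvFindA] at h
      rw [if_pos hs] at h
      exact absurd h (by simp)
    · simp only [pvFindA] at h
      rw [if_neg hs] at h
      intro q hq
      rcases List.mem_cons.mp hq with rfl | hq
      · exact Bool.eq_false_iff.mpr hs
      · exact ih h q hq

theorem pvMemSorted (q : String) : q ∈ pvProteinPrefixesSorted ↔ q ∈ pvProteinGroups.keys :=
  (PySem.List.sorted_perm _ _ _).mem_iff

theorem pvSortedPairwise :
    pvProteinPrefixesSorted.Pairwise (fun a b => PySem.Str.len b ≤ PySem.Str.len a) :=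
  PySem.List.sorted_pairwise_rev _ _

-- ---- B-side: flattened entries and the running-max step ----
def pvEntries : List (String × Option String) :=
  pvProteinTable.flatMap (fun gp => gp.2.map (fun p => (p, gp.1)))

def pvStep (ing : String) (st : Int × Option String) (pg : String × Option String) :
    Int × Option String :=
  if PySem.Str.len pg.1 > st.1 ∧ PySem.Str.startswith ing pg.1 = true
  then (PySem.Str.len pg.1, pg.2) else st

theorem pvAltFold (ing : String) (t : List (Option String × List String))
    (s : Int × Option String) :
    t.foldl (fun st gp =>
      gp.2.foldl (fun st p =>
        if PySem.Str.len p > st.1 ∧ PySem.Str.startswith ing p = true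
        then (PySem.Str.len p, gp.1) else st) st) s
    = (t.flatMap (fun gp => gp.2.map (fun p => (p, gp.1)))).foldl (pvStep ing) s := by
  induction t generalizing s with
  | nil => rfl
  | cons gp rest ih =>
    simp only [List.foldl_cons, List.flatMap_cons, List.foldl_append, List.foldl_map]
    rw [ih]
    rfl

theorem pvAltFold' (ing : String) (s : Int × Option String) :
    pvProteinTable.foldl (fun st gp =>
      gp.2.foldl (fun st p =>
        if PySem.Str.len p > st.1 ∧ PySem.Str.startswith ing p = true
        then (PySem.Str.len p, gp.1) else st) st) s
    = pvEntries.foldl (pvStep ing) s := pvAltFold ing pvProteinTable s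

theorem pvBest_ub (ing : String) (l : List (String × Option String))
    (s : Int × Option String) : s.1 ≤ (l.foldl (pvStep ing) s).1 := by
  induction l generalizing s with
  | nil => exact le_refl _
  | cons pg rest ih =>
    simp only [List.foldl_cons]
    refine le_trans ?_ (ih (pvStep ing s pg))
    unfold pvStep
    split_ifs with h
    · exact le_of_lt h.1
    · exact le_refl _

theorem pvBest_max (ing : String) (l : List (String × Option String))
    (s : Int × Option String) :
    ∀ pg ∈ l, PySem.Str.startswith ing pg.1 = true →
      PySem.Str.len pg.1 ≤ (l.foldl (pvStep ing) s).1 := by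
  induction l generalizing s with
  | nil => simp
  | cons q rest ih =>
    intro pg hpg hsw
    rcases List.mem_cons.mp hpg with rfl | hm
    · refine le_trans ?_ (pvBest_ub ing rest (pvStep ing s pg))
      unfold pvStep
      split_ifs with h
      · exact le_refl _
      · rw [not_and_or] at h
        rcases h with h | h
        · omega
        · exact absurd hsw h
    · exact ih (pvStep ing s q) pg hm hsw

theorem pvBest_cases (ing : String) (l : List (String × Option String))
    (s : Int × Option String) :
    l.foldl (pvStep ing) s = s ∨
      ∃ pg ∈ l, PySem.Str.startswith ing pg.1 = true ∧
        l.foldl (pvStep ing) s = (PySem.Str.len pg.1, pg.2) := by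
  induction l generalizing s with
  | nil => exact Or.inl rfl
  | cons q rest ih =>
    simp only [List.foldl_cons]
    rcases ih (pvStep ing s q) with h | ⟨pg, hm, hsw, hr⟩
    · rw [h]
      unfold pvStep
      split_ifs with hc
      · exact Or.inr ⟨q, List.mem_cons_self, hc.2, rfl⟩
      · exact Or.inl rfl
    · exact Or.inr ⟨pg, List.mem_cons_of_mem _ hm, hsw, hr⟩

-- ---- finite facts linking the two constant tables (checked by the kernel) ----
set_option maxRecDepth 80000 in
theorem pvEntriesLookup : ∀ pg ∈ pvEntries, pvProteinGroups.get? pg.1 = some pg.2 := by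
  decide

set_option maxRecDepth 80000 in
theorem pvEntriesKeys : ∀ pg ∈ pvEntries, pvProteinGroups.contains pg.1 = true := by
  decide

set_option maxRecDepth 80000 in
theorem pvKeysEntries : ∀ k ∈ pvProteinGroups.keys, k ∈ pvEntries.map Prod.fst := by
  decide

theorem pvStartswith_iff (ing p : String) :
    PySem.Str.startswith ing p = true ↔ p.toList <+: ing.toList := by
  rw [PySem.Str.startswith_eq, PySem.Chars.startswith_iff]

-- ---- the per-ingredient equality ----
theorem pvScan_eq (ing : String) :
    pvScanA ing pvProteinPrefixesSorted
      = (pvEntries.foldl (pvStep ing) ((-1 : Int), (none : Option String))).2 := by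
  rw [pvScanA_eq_find]
  cases hA : pvFindA ing pvProteinPrefixesSorted with
  | none =>
    rcases pvBest_cases ing pvEntries ((-1 : Int), (none : Option String)) with h | ⟨pg, hm, hsw, _⟩
    · rw [h]; rfl
    · exfalso
      have hk : pg.1 ∈ pvProteinPrefixesSorted :=
        (pvMemSorted pg.1).mpr ((PySem.Dict.contains_iff_mem_keys _ _).mp (pvEntriesKeys pg hm))
      have := pvFindA_none ing _ hA pg.1 hk
      rw [hsw] at this
      exact absurd this (by simp)
  | some k =>
    obtain ⟨hmem, hsw⟩ := pvFindA_some ing _ k hA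
    have hkk : k ∈ pvProteinGroups.keys := (pvMemSorted k).mp hmem
    obtain ⟨pg0, hpg0, hfst⟩ := List.mem_map.mp (pvKeysEntries k hkk)
    have hget : pvProteinGroups.get? k = some pg0.2 := by
      rw [← hfst]; exact pvEntriesLookup pg0 hpg0
    have hswk : PySem.Str.startswith ing pg0.1 = true := by rw [hfst]; exact hsw
    have hmax : PySem.Str.len pg0.1 ≤ (pvEntries.foldl (pvStep ing) ((-1 : Int), none)).1 :=
      pvBest_max ing pvEntries _ pg0 hpg0 hswk
    have hlen0 : (0 : Int) ≤ PySem.Str.len pg0.1 := by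
      rw [PySem.Str.len_eq]; exact Int.natCast_nonneg _
    rcases pvBest_cases ing pvEntries ((-1 : Int), (none : Option String)) with h | ⟨pg, hm, hswp, hr⟩
    · exfalso
      rw [h] at hmax
      simp only at hmax
      omega
    · -- the winner pg has maximal length, hence equals k
      have hpk : pg.1 ∈ pvProteinPrefixesSorted :=
        (pvMemSorted pg.1).mpr ((PySem.Dict.contains_iff_mem_keys _ _).mp (pvEntriesKeys pg hm))
      have h1 : PySem.Str.len pg.1 ≤ PySem.Str.len k :=
        pvFindA_max ing _ k pvSortedPairwise hA pg.1 hpk hswp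
      have h2 : PySem.Str.len pg0.1 ≤ PySem.Str.len pg.1 := by
        rw [hr] at hmax; exact hmax
      rw [hfst] at h2
      have hlens : PySem.Str.len pg.1 = PySem.Str.len k := le_antisymm h1 h2
      rw [PySem.Str.len_eq, PySem.Str.len_eq] at hlens
      have hle : pg.1.toList.length = k.toList.length := by exact_mod_cast hlens
      have heq : pg.1 = k := by
        apply String.toList_inj.mp
        rw [List.prefix_iff_eq_take.mp ((pvStartswith_iff ing pg.1).mp hswp),
            List.prefix_iff_eq_take.mp ((pvStartswith_iff ing k).mp hsw), hle]
      have hgetp : pvProteinGroups.get? pg.1 = some pg.2 := pvEntriesLookup pg hm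
      rw [heq, hget] at hgetp
      obtain hg2 := (Option.some.injEq _ _).mp hgetp
      rw [hr]
      simp only [Option.bind_some]
      rw [hget]
      simp [hg2]

-- ===== VERDICT (by name: the statement is the Claim_ definition above) =====
theorem extract_primary_proteins_py_spec : Claim_equal_extract_primary_proteins_py := by
  intro ing_set _
  unfold Spec_extract_primary_proteins_py extract_primary_proteins_py extract_primary_proteins_py_alt
  refine PySem.List.foldl_congr_mem _ _ _ _ (fun acc x _ => ?_)
  rw [pvScan_eq, pvAltFold']
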